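-- pv_equiv track=rewrite | github.com/andsopwn/LXC-Threat-API-Mapping | ast-visualizer/astvisualizer.py | collect_related
-- ===== SOURCE A (Python) =====
-- def collect_related(target_calls, callers_map):
--     related = set()
--     for fn, *_ in target_calls:
--         related.add(fn)
--         stack = [fn]
--         while stack:
--             cur = stack.pop()
--             for parent in callers_map.get(cur, []):
--                 if parent not in related:
--                     related.add(parent)
--                     stack.append(parent)
--     return related
-- ===== SOURCE B (Python) =====
-- def collect_related(target_calls, callers_map):
--     # Recursive DFS: the call stack replaces A's explicit stack; recursing over
--     # the newly discovered callers newest-first preserves A's discovery order.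
--     # Very deep caller chains could hit Python's recursion limit.
--     related = set()
--
--     def visit(cur):
--         fresh = []
--         for parent in callers_map.get(cur, []):
--             if parent not in related:
--                 related.add(parent)
--                 fresh.append(parent)
--         for parent in reversed(fresh):
--             visit(parent)
--
--     for fn, *_ in target_calls:
--         related.add(fn)
--         visit(fn)
--     return related
-- ===== Notes on version B (the rewrite author's own statement) =====
-- stated objective: alternative
-- what changed: A's explicit worklist stack and while-loop are replaced by a recursive DFS helper visit(cur) that uses the call stack, collecting each node's newly discovered callers and recursing over them newest-first.
import Mathlib
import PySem

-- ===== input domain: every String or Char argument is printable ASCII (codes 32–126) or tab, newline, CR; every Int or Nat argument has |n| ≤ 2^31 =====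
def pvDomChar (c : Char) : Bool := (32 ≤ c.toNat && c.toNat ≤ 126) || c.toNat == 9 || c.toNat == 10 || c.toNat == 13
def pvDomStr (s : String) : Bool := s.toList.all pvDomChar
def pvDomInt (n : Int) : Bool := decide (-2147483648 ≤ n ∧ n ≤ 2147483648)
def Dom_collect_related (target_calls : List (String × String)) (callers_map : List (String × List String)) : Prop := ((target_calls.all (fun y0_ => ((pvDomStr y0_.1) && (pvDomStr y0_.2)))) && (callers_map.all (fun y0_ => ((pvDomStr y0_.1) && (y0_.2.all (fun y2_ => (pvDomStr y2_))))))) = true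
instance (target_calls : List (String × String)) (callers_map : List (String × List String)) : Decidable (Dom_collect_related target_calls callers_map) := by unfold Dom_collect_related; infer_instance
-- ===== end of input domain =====

-- B replaces A's explicit worklist stack by a recursive DFS on the call stack
-- (recursing over newly discovered callers newest-first); objective: alternative.
-- (In Python, B could hit the recursion limit on extremely deep caller chains where A iterates.)

-- ===== PORT A =====
-- inner loop of A: 'for parent in callers_map.get(cur, []): if parent not in related: related.add(parent); <acc>.append(parent)'
-- (state = (related, stack)); the same loop appears verbatim in Source B with <acc> = fresh.
def crInner (related_st : List String × List String) (parent : String) : List String × List String :=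
  if PySem.Set.contains related_st.1 parent then related_st
  else (PySem.Set.add related_st.1 parent, related_st.2 ++ [parent])

-- fuel bound used by both ports, a totality guard only: A's loop runs
-- pops + 1 ≤ (1 + number of distinct pushed parents) + 1 times, and B makes
-- one visit call per pop, so neither port ever exhausts it.
def pvFuel (callers_map : List (String × List String)) : Nat :=
  (callers_map.map (fun kv => kv.2.length)).sum + 2

-- the 'while stack:' loop (one unit of fuel per iteration); cur = stack.pop() is the LAST element
def crWhile (callers_map : List (String × List String)) (fuel : Nat) (related stack : List String) : List String :=
  match fuel with
  | 0 => related
  | f + 1 =>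
    match stack.getLast? with
    | none => related                                   -- stack empty: loop ends
    | some cur =>                                       -- cur = stack.pop()
      let rs := (PySem.Dict.getD ⟨callers_map⟩ cur []).foldl crInner (related, stack.dropLast)
      crWhile callers_map f rs.1 rs.2

def collect_related (target_calls : List (String × String)) (callers_map : List (String × List String)) : List String :=
  target_calls.foldl
    (fun related fnp =>
      -- related.add(fn); stack = [fn]; while stack: …
      crWhile callers_map (pvFuel callers_map) (PySem.Set.add related fnp.1) [fnp.1])
    PySem.Set.empty

-- ===== PORT B =====
-- visit(cur) and the loop 'for parent in reversed(fresh): visit(parent)'.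
-- Fuel is a totality guard only: one unit per visit call, threaded through the
-- recursion; the 'min' caps it for the termination measure and is the identity
-- on every reachable call.
mutual
def visitB (callers_map : List (String × List String)) (fuel : Nat) (related : List String) (cur : String) : Nat × List String :=
  match fuel with
  | 0 => (0, related)
  | f + 1 =>
    -- the fresh-collecting loop of Source B, state = (related, fresh)
    let rf := (PySem.Dict.getD ⟨callers_map⟩ cur []).foldl crInner (related, [])
    visitAll callers_map f rf.1 rf.2.reverse            -- for parent in reversed(fresh): visit(parent)
termination_by (fuel, 0)
decreasing_by exact Prod.Lex.left _ _ (Nat.lt_succ_self f)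

def visitAll (callers_map : List (String × List String)) (fuel : Nat) (related : List String) (todo : List String) : Nat × List String :=
  match todo with
  | [] => (fuel, related)
  | p :: rest =>
    let fr := visitB callers_map fuel related p
    visitAll callers_map (min fr.1 fuel) fr.2 rest
termination_by (fuel, todo.length + 1)
decreasing_by
  · exact Prod.Lex.right _ (by omega)
  · rcases Nat.lt_or_ge (min fr.1 fuel) fuel with h | h
    · exact Prod.Lex.left _ _ h
    · have he : min fr.1 fuel = fuel := Nat.le_antisymm (Nat.min_le_right _ _) h
      rw [he]; exact Prod.Lex.right _ (by simp)
end

def collect_related_alt (target_calls : List (String × String)) (callers_map : List (String × List String)) : List String :=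
  target_calls.foldl
    (fun related fnp =>
      -- related.add(fn); visit(fn)
      (visitB callers_map (pvFuel callers_map) (PySem.Set.add related fnp.1) fnp.1).2)
    PySem.Set.empty

-- ===== PRECONDITION & SPEC =====
def Spec_collect_related (target_calls : List (String × String)) (callers_map : List (String × List String)) (out : List String) : Prop := out = collect_related_alt target_calls callers_map
instance (target_calls : List (String × String)) (callers_map : List (String × List String)) (out : List String) : Decidable (Spec_collect_related target_calls callers_map out) := by unfold Spec_collect_related; infer_instance

-- ===== CLAIM (what is proved, stated in full; the proofs are below) =====
def Claim_equal_collect_related : Prop := ∀ (target_calls : List (String × String)) (callers_map : List (String × List String)), Dom_collect_related target_calls callers_map → Spec_collect_related target_calls callers_map (collect_related target_calls callers_map)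

-- ===== LEMMAS AND PROOFS =====

-- unfolding equations for the well-founded definitions
theorem visitB_zero (cm : List (String × List String)) (r : List String) (c : String) :
    visitB cm 0 r c = (0, r) := by rw [visitB]

theorem visitB_succ (cm : List (String × List String)) (f : Nat) (r : List String) (c : String) :
    visitB cm (f + 1) r c
      = visitAll cm f ((PySem.Dict.getD ⟨cm⟩ c []).foldl crInner (r, [])).1
          ((PySem.Dict.getD ⟨cm⟩ c []).foldl crInner (r, [])).2.reverse := by rw [visitB]

theorem visitAll_nil (cm : List (String × List String)) (fuel : Nat) (r : List String) :
    visitAll cm fuel r [] = (fuel, r) := by rw [visitAll]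

theorem visitAll_cons (cm : List (String × List String)) (fuel : Nat) (r : List String) (p : String) (rest : List String) :
    visitAll cm fuel r (p :: rest)
      = visitAll cm (min (visitB cm fuel r p).1 fuel) (visitB cm fuel r p).2 rest := by rw [visitAll]

-- with no fuel, nothing happens
theorem visitAll_zero (cm : List (String × List String)) (r : List String) :
    ∀ l : List String, visitAll cm 0 r l = (0, r) := by
  intro l
  induction l generalizing r with
  | nil => rw [visitAll_nil]
  | cons p rest ih => rw [visitAll_cons, visitB_zero]; simpa using ih r

-- visitAll never returns more fuel than it was given
theorem visitAll_fuel_le (cm : List (String × List String)) :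
    ∀ (l : List String) (fuel : Nat) (r : List String), (visitAll cm fuel r l).1 ≤ fuel := by
  intro l
  induction l with
  | nil => intro fuel r; rw [visitAll_nil]
  | cons p rest ih =>
    intro fuel r
    rw [visitAll_cons]
    exact le_trans (ih _ _) (Nat.min_le_right _ _)

-- an empty stack returns related for any fuel
theorem crWhile_nil (cm : List (String × List String)) (fuel : Nat) (r : List String) :
    crWhile cm fuel r [] = r := by
  match fuel with
  | 0 => rw [crWhile]
  | f + 1 => rw [crWhile]; rfl

-- one iteration of the while loop on a nonempty stack
theorem crWhile_concat (cm : List (String × List String)) (f : Nat) (r s : List String) (cur : String) :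
    crWhile cm (f + 1) r (s ++ [cur])
      = crWhile cm f ((PySem.Dict.getD ⟨cm⟩ cur []).foldl crInner (r, s)).1
          ((PySem.Dict.getD ⟨cm⟩ cur []).foldl crInner (r, s)).2 := by
  rw [crWhile]
  simp

-- the inner loop only appends to the stack/fresh component
theorem foldl_crInner_append (ps : List String) :
    ∀ (r s : List String),
      ps.foldl crInner (r, s) = ((ps.foldl crInner (r, [])).1, s ++ (ps.foldl crInner (r, [])).2) := by
  induction ps with
  | nil => intro r s; simp
  | cons p rest ih =>
    intro r s
    simp only [List.foldl_cons, crInner]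
    by_cases h : PySem.Set.contains r p = true
    · simp only [if_pos h]
      exact ih r s
    · simp only [if_neg h]
      rw [ih (PySem.Set.add r p) (s ++ [p]), ih (PySem.Set.add r p) ([] ++ [p])]
      simp

-- MAIN SIMULATION: running A's while loop on stack 'front ++ l' first performs
-- B's recursive visits of l (last element first), then resumes with stack 'front';
-- fuel is consumed identically (one unit per pop = one unit per visit call).
theorem crWhile_eq_visitAll (cm : List (String × List String)) :
    ∀ (fuel : Nat) (related front l : List String),
      crWhile cm fuel related (front ++ l)
        = crWhile cm (visitAll cm fuel related l.reverse).1 (visitAll cm fuel related l.reverse).2 front := by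
  intro fuel
  induction fuel using Nat.strong_induction_on with
  | _ fuel IH =>
    intro related front l
    match fuel with
    | 0 =>
      rw [crWhile, visitAll_zero, crWhile]
    | f + 1 =>
      rcases l.eq_nil_or_concat with rfl | ⟨linit, cur, rfl⟩
      · simp [visitAll_nil]
      · -- LHS: pop cur, run the inner loop, continue
        rw [List.concat_eq_append, ← List.append_assoc, crWhile_concat, foldl_crInner_append]
        set e := (PySem.Dict.getD ⟨cm⟩ cur []).foldl crInner (related, []) with he
        -- stack is (front ++ linit) ++ e.2 : apply the IH at fuel f with l := e.2
        rw [IH f (Nat.lt_succ_self f) e.1 (front ++ linit) e.2]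
        rw [← visitB_succ]
        set fr := visitB cm (f + 1) related cur with hfr
        -- resume on front ++ linit : apply the IH at fuel fr.1 ≤ f
        have hle : fr.1 ≤ f := by
          rw [hfr, visitB_succ, ← he]; exact visitAll_fuel_le cm _ _ _
        rw [IH fr.1 (Nat.lt_succ_of_le hle) fr.2 front linit]
        -- RHS: visitAll on (linit ++ [cur]).reverse = cur :: linit.reverse
        have hmin : min fr.1 (f + 1) = fr.1 :=
          Nat.min_eq_left (Nat.le_succ_of_le hle)
        rw [List.reverse_append, List.reverse_cons, List.reverse_nil,
          List.nil_append, List.singleton_append, visitAll_cons, ← hfr, hmin]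

-- one outer iteration: A's stack loop started on [fn] equals B's visit fn
theorem crWhile_single (cm : List (String × List String)) (fuel : Nat) (related : List String) (fn : String) :
    crWhile cm fuel related [fn] = (visitB cm fuel related fn).2 := by
  have h := crWhile_eq_visitAll cm fuel related [] [fn]
  simp only [List.nil_append] at h
  rw [h, crWhile_nil]
  simp [visitAll_cons, visitAll_nil]


-- the two outer folds agree pointwise
theorem foldl_outer_eq (cm : List (String × List String)) :
    ∀ (tc : List (String × String)) (r : List String),
      tc.foldl (fun related fnp => crWhile cm (pvFuel cm) (PySem.Set.add related fnp.1) [fnp.1]) r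
        = tc.foldl (fun related fnp => (visitB cm (pvFuel cm) (PySem.Set.add related fnp.1) fnp.1).2) r := by
  intro tc r
  simp only [crWhile_single]

-- ===== VERDICT (by name: the statement is the Claim_ definition above) =====
theorem collect_related_spec : Claim_equal_collect_related := by
  intro target_calls callers_map _
  unfold Spec_collect_related collect_related collect_related_alt
  exact foldl_outer_eq callers_map target_calls PySem.Set.empty
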